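-- pv_equiv track=rewrite | github.com/beixia011/Aemeath-Remote-Control | agent/agent.py | _apply_video_bandwidth
-- ===== SOURCE A (Python) =====
-- def _apply_video_bandwidth(sdp: str, bitrate_kbps: int) -> str:
--     lines = sdp.splitlines()
--     out: list[str] = []
--     in_video = False
--
--     for line in lines:
--         if line.startswith("m="):
--             in_video = line.startswith("m=video")
--             out.append(line)
--             if in_video:
--                 out.append(f"b=AS:{max(300, int(bitrate_kbps))}")
--             continue
--
--         if in_video and line.startswith("b=AS:"):
--             continue
--
--         out.append(line)
--
--     return "\r\n".join(out) + "\r\n"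
-- ===== SOURCE B (Python) =====
-- def _split_section(lines):
--     # lines up to (not including) the next "m=" header, and the rest
--     body = []
--     i = 0
--     while i < len(lines) and not lines[i].startswith("m="):
--         body.append(lines[i])
--         i += 1
--     return body, lines[i:]
--
--
-- def _apply_video_bandwidth(sdp: str, bitrate_kbps: int) -> str:
--     preamble, rest = _split_section(sdp.splitlines())
--     out = list(preamble)  # everything before the first m= line, unchanged
--     while rest:
--         header = rest[0]
--         body, rest = _split_section(rest[1:])
--         out.append(header)
--         if header.startswith("m=video"):
--             out.append(f"b=AS:{max(300, int(bitrate_kbps))}")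
--             body = [l for l in body if not l.startswith("b=AS:")]
--         out.extend(body)
--     return "\r\n".join(out) + "\r\n"
-- ===== Notes on version B (the rewrite author's own statement) =====
-- stated objective: alternative
-- what changed: B splits the SDP into a preamble plus per-'m=' sections with a helper and rewrites each video section wholesale (insert b=AS line, filter the body), instead of A's single pass carrying an in_video flag.
import Mathlib
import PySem

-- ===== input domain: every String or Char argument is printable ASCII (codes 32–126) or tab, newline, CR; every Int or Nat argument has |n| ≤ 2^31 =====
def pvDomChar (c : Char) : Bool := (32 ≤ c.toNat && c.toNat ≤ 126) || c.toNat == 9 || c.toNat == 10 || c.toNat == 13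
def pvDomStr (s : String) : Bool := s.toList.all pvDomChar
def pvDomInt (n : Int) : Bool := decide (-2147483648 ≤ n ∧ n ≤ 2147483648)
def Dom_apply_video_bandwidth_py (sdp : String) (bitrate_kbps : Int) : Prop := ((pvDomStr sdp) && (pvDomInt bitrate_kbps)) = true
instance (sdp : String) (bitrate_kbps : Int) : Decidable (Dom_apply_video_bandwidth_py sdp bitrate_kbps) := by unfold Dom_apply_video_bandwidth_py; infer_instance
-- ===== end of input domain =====

-- B replaces A's single flagged pass by a section decomposition (preamble + per-'m=' groups); alternative decomposition, same cost.

-- ===== PORT A =====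
-- A: one pass over the lines with an in_video flag, accumulating out.
def apply_video_bandwidth_py (sdp : String) (bitrate_kbps : Int) : String :=
  let lines := PySem.Str.splitlines sdp
  let st := lines.foldl (fun (st : List String × Bool) line =>
    if PySem.Str.startswith line "m=" then
      let in_video := PySem.Str.startswith line "m=video"
      (st.1 ++ [line] ++
        (if in_video then ["b=AS:" ++ PySem.Int.toStr (max 300 bitrate_kbps)] else []),
       in_video)
    else if st.2 && PySem.Str.startswith line "b=AS:" then st
    else (st.1 ++ [line], st.2)) (([] : List String), false)
  PySem.Str.join "\r\n" st.1 ++ "\r\n"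

-- ===== PORT B =====
-- _split_section: lines up to (not including) the next "m=" header, and the rest
def pvSplitSection : List String → List String × List String
  | [] => ([], [])
  | l :: rest =>
    if PySem.Str.startswith l "m=" then ([], l :: rest)
    else
      let p := pvSplitSection rest
      (l :: p.1, p.2)

theorem pvSplitSection_len (ls : List String) : (pvSplitSection ls).2.length ≤ ls.length := by
  induction ls with
  | nil => simp [pvSplitSection]
  | cons l rest ih =>
    simp only [pvSplitSection]
    split
    · simp
    · simp
      omega

-- the while-loop of B: emit each section, rewriting video sections
def pvSections (bitrate_kbps : Int) : List String → List String
  | [] => []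
  | header :: rest =>
    let p := pvSplitSection rest
    (header ::
      (if PySem.Str.startswith header "m=video" then
        ("b=AS:" ++ PySem.Int.toStr (max 300 bitrate_kbps)) ::
          p.1.filter (fun l => !PySem.Str.startswith l "b=AS:")
      else p.1)) ++ pvSections bitrate_kbps p.2
  termination_by ls => ls.length
  decreasing_by
    have := pvSplitSection_len rest
    simp only [List.length_cons]
    omega

def apply_video_bandwidth_py_alt (sdp : String) (bitrate_kbps : Int) : String :=
  let p := pvSplitSection (PySem.Str.splitlines sdp)
  PySem.Str.join "\r\n" (p.1 ++ pvSections bitrate_kbps p.2) ++ "\r\n"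

-- ===== PRECONDITION & SPEC =====
def Spec_apply_video_bandwidth_py (sdp : String) (bitrate_kbps : Int) (out : String) : Prop := out = apply_video_bandwidth_py_alt sdp bitrate_kbps
instance (sdp : String) (bitrate_kbps : Int) (out : String) : Decidable (Spec_apply_video_bandwidth_py sdp bitrate_kbps out) := by unfold Spec_apply_video_bandwidth_py; infer_instance

-- ===== CLAIM (what is proved, stated in full; the proofs are below) =====
def Claim_equal_apply_video_bandwidth_py : Prop := ∀ (sdp : String) (bitrate_kbps : Int), Dom_apply_video_bandwidth_py sdp bitrate_kbps → Spec_apply_video_bandwidth_py sdp bitrate_kbps (apply_video_bandwidth_py sdp bitrate_kbps)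

-- ===== LEMMAS AND PROOFS =====

-- A's loop written as direct recursion (flag as an argument)
def pvLa (bitrate_kbps : Int) : Bool → List String → List String
  | _, [] => []
  | inv, l :: rest =>
    if PySem.Str.startswith l "m=" then
      let v := PySem.Str.startswith l "m=video"
      (if v then [l, "b=AS:" ++ PySem.Int.toStr (max 300 bitrate_kbps)] else [l]) ++
        pvLa bitrate_kbps v rest
    else if inv && PySem.Str.startswith l "b=AS:" then pvLa bitrate_kbps inv rest
    else l :: pvLa bitrate_kbps inv rest

theorem pvFoldA (bk : Int) (lines : List String) : ∀ (out : List String) (inv : Bool),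
    (lines.foldl (fun (st : List String × Bool) line =>
      if PySem.Str.startswith line "m=" then
        (st.1 ++ [line] ++
          (if PySem.Str.startswith line "m=video" then
            ["b=AS:" ++ PySem.Int.toStr (max 300 bk)] else []),
         PySem.Str.startswith line "m=video")
      else if st.2 && PySem.Str.startswith line "b=AS:" then st
      else (st.1 ++ [line], st.2)) (out, inv)).1
    = out ++ pvLa bk inv lines := by
  induction lines with
  | nil => intro out inv; simp [pvLa]
  | cons l rest ih =>
    intro out inv
    rw [List.foldl_cons, pvLa]
    by_cases h1 : PySem.Str.startswith l "m=" = true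
    · rw [if_pos h1, if_pos h1]
      by_cases hv : PySem.Str.startswith l "m=video" = true
      · simp only [hv, if_pos]
        rw [ih]
        simp
      · simp only [hv, Bool.false_eq_true, if_neg, not_false_iff]
        rw [ih]
        simp
    · rw [if_neg h1, if_neg h1]
      by_cases h2 : (inv && PySem.Str.startswith l "b=AS:") = true
      · rw [if_pos h2, if_pos h2, ih]
      · rw [if_neg h2, if_neg h2]
        rw [ih]
        simp

-- the key invariant: A's loop on any tail equals "finish the current body, then the sections"
theorem pvLa_eq_sections (bk : Int) : ∀ (n : Nat) (ls : List String), ls.length ≤ n →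
    ∀ (v : Bool), pvLa bk v ls =
      (if v then (pvSplitSection ls).1.filter (fun l => !PySem.Str.startswith l "b=AS:")
       else (pvSplitSection ls).1) ++ pvSections bk (pvSplitSection ls).2 := by
  intro n
  induction n with
  | zero =>
    intro ls h v
    have : ls = [] := by cases ls <;> simp_all
    subst this
    simp [pvLa, pvSplitSection, pvSections]
  | succ n ih =>
    intro ls h v
    cases ls with
    | nil => simp [pvLa, pvSplitSection, pvSections]
    | cons l rest =>
      have hr : rest.length ≤ n := by simp at h; omega
      by_cases hm : PySem.Str.startswith l "m=" = true
      · have hs : pvSplitSection (l :: rest) = ([], l :: rest) := by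
          simp only [pvSplitSection, hm, if_pos]
        rw [hs]
        simp only [pvLa, hm, if_pos, List.filter_nil, ite_self]
        rw [pvSections]
        rw [ih rest hr (PySem.Str.startswith l "m=video")]
        by_cases hv : PySem.Str.startswith l "m=video" = true
        · simp only [hv, if_pos]
          simp
        · simp only [hv, Bool.false_eq_true, if_neg, not_false_iff]
          simp
      · have hs : pvSplitSection (l :: rest) =
            (l :: (pvSplitSection rest).1, (pvSplitSection rest).2) := by
          simp only [pvSplitSection, hm, if_neg, Bool.false_eq_true, not_false_iff]
        rw [hs]
        simp only [pvLa, hm, Bool.false_eq_true, if_neg, not_false_iff]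
        by_cases hv : v = true
        · subst hv
          by_cases hb : PySem.Str.startswith l "b=AS:" = true
          · have hb' : PySem.Chars.startswith l.toList ['b', '=', 'A', 'S', ':'] = true := by
              simpa using hb
            simp only [hb, Bool.and_self, if_pos, if_true]
            rw [ih rest hr true]
            simp [List.filter_cons, hb']
          · have hb' : ¬ PySem.Chars.startswith l.toList ['b', '=', 'A', 'S', ':'] = true := by
              simpa using hb
            simp only [hb, Bool.and_false, Bool.false_eq_true, if_neg, not_false_iff, if_true]
            rw [ih rest hr true]
            simp [List.filter_cons, hb']
        · simp only [Bool.not_eq_true] at hv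
          subst hv
          simp only [Bool.false_and, Bool.false_eq_true, if_neg, not_false_iff]
          rw [ih rest hr false]
          simp

-- ===== VERDICT (by name: the statement is the Claim_ definition above) =====
theorem apply_video_bandwidth_py_spec : Claim_equal_apply_video_bandwidth_py := by
  intro sdp bk _
  unfold Spec_apply_video_bandwidth_py apply_video_bandwidth_py apply_video_bandwidth_py_alt
  simp only
  rw [pvFoldA bk (PySem.Str.splitlines sdp) [] false,
      pvLa_eq_sections bk (PySem.Str.splitlines sdp).length (PySem.Str.splitlines sdp) le_rfl false]
  simp
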